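-- pv_equiv track=rewrite | github.com/wlc952/GPT-SoVITS-TPU | run_by_perf.py | find_penultimate_tag
-- ===== SOURCE A (Python) =====
-- def find_penultimate_tag(lst):
--     tag = [0,3,4,321]
--     count = 0
--     for i in range(len(lst)-1, -1, -1):
--         if lst[i] in tag:
--             count += 1
--             if count == 2:
--                 return i
--     return -1
-- ===== SOURCE B (Python) =====
-- def find_penultimate_tag(lst):
--     tag = [0, 3, 4, 321]
--     indices = [i for i in range(len(lst)) if lst[i] in tag]
--     return indices[-2] if len(indices) >= 2 else -1
-- ===== Notes on version B (the rewrite author's own statement) =====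
-- stated objective: simpler
-- what changed: Replaces the reverse scan with an early-return counter by a build-table-then-select decomposition: collect all matching positions in one forward pass, then select the second-from-last position if at least two exist, else return minus one.
import Mathlib
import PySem

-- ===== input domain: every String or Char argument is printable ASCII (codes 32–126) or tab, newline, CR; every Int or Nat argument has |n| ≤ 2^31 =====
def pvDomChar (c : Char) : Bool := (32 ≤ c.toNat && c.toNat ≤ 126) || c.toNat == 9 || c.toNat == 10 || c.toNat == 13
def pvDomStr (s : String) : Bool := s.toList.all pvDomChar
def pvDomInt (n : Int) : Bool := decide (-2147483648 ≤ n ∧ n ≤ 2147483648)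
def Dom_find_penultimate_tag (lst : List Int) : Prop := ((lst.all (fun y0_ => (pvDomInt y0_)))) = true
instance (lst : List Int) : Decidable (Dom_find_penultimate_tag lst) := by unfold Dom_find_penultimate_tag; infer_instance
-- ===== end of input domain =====

-- B replaces A's reverse scan with an early-return counter by "collect all matching
-- positions forward, then select indices[-2]" (objective: simpler decomposition).

-- ===== PORT A =====
-- the loop body: descending indices, count of matches so far, early return at count == 2
-- (all indices come from range(len-1, -1, -1), so lst[i] is always in range; pyGetD is exact there)
def findA_loop (lst tag : List Int) : List Int → Int → Int
  | [], _ => -1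
  | i :: rest, count =>
    if PySem.List.pyGetD lst i 0 ∈ tag then
      if count + 1 = 2 then i else findA_loop lst tag rest (count + 1)
    else findA_loop lst tag rest count

def find_penultimate_tag (lst : List Int) : Int :=
  findA_loop lst [0, 3, 4, 321] (PySem.List.pyRange ((lst.length : Int) - 1) (-1) (-1)) 0

-- ===== PORT B =====
def find_penultimate_tag_alt (lst : List Int) : Int :=
  let tag : List Int := [0, 3, 4, 321]
  let indices := (PySem.List.pyRange 0 (lst.length : Int) 1).filter
    (fun i => PySem.List.pyGetD lst i 0 ∈ tag)
  if 2 ≤ indices.length then PySem.List.pyGetD indices (-2) (-1) else -1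

-- ===== PRECONDITION & SPEC =====
def Spec_find_penultimate_tag (lst : List Int) (out : Int) : Prop := out = find_penultimate_tag_alt lst
instance (lst : List Int) (out : Int) : Decidable (Spec_find_penultimate_tag lst out) := by unfold Spec_find_penultimate_tag; infer_instance

-- ===== CLAIM (what is proved, stated in full; the proofs are below) =====
def Claim_equal_find_penultimate_tag : Prop := ∀ (lst : List Int), Dom_find_penultimate_tag lst → Spec_find_penultimate_tag lst (find_penultimate_tag lst)

-- ===== LEMMAS AND PROOFS =====

-- With count = 1, the loop returns the first match (head of the filtered list).
theorem findA_loop_one (lst tag : List Int) (is : List Int) :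
    findA_loop lst tag is 1 =
      ((is.filter (fun i => decide (PySem.List.pyGetD lst i 0 ∈ tag))).head?).getD (-1) := by
  induction is with
  | nil => simp [findA_loop]
  | cons i rest ih =>
    by_cases h : PySem.List.pyGetD lst i 0 ∈ tag <;>
      simp [findA_loop, h, ih]

-- With count = 0, the loop returns the second match.
theorem findA_loop_zero (lst tag : List Int) (is : List Int) :
    findA_loop lst tag is 0 =
      ((is.filter (fun i => decide (PySem.List.pyGetD lst i 0 ∈ tag)))[1]?).getD (-1) := by
  induction is with
  | nil => simp [findA_loop]
  | cons i rest ih =>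
    by_cases h : PySem.List.pyGetD lst i 0 ∈ tag
    · have hstep : findA_loop lst tag (i :: rest) 0 = findA_loop lst tag rest 1 := by
        simp [findA_loop, h]
      rw [hstep, findA_loop_one]
      simp [h, List.head?_eq_getElem?]
    · simp [findA_loop, h, ih]

-- ===== VERDICT (by name: the statement is the Claim_ definition above) =====
theorem find_penultimate_tag_spec : Claim_equal_find_penultimate_tag := by
  intro lst _
  unfold Spec_find_penultimate_tag find_penultimate_tag find_penultimate_tag_alt
  set tag : List Int := [0, 3, 4, 321] with htag
  have hrange : PySem.List.pyRange ((lst.length : Int) - 1) (-1) (-1)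
      = (PySem.List.pyRange 0 (lst.length : Int) 1).reverse := by
    rw [PySem.List.pyRange_neg_one_eq_reverse]
    norm_num
  rw [findA_loop_zero, hrange, List.filter_reverse]
  set F := (PySem.List.pyRange 0 (lst.length : Int) 1).filter
      (fun i => decide (PySem.List.pyGetD lst i 0 ∈ tag)) with hF
  show F.reverse[1]?.getD (-1) = if 2 ≤ F.length then PySem.List.pyGetD F (-2) (-1) else -1
  by_cases h2 : 2 ≤ F.length
  · rw [if_pos h2, PySem.List.pyGetD_neg_ofNat F 2 (-1) (by omega) h2]
    rw [List.getElem?_reverse (by omega)]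
    have he : F.length - 1 - 1 = F.length - 2 := by omega
    rw [he, List.getElem?_eq_getElem (by omega)]
    rfl
  · have hn : F.reverse[1]? = none := by
      rw [List.getElem?_eq_none]
      simp only [List.length_reverse]
      omega
    rw [if_neg h2, hn]
    rfl
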